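-- pv_equiv track=rewrite | github.com/Snuthakki21/SSIS_TO_AUTOSYS | compare_schema.py | _clean_sql_for_output
-- ===== SOURCE A (Python) =====
-- def _clean_sql_for_output(sql: str) -> str:
--     """Remove leading comment headers from SQL for clean output."""
--     lines = sql.split('\n')
--     result = []
--     in_header = True
--
--     for line in lines:
--         # Skip comment lines and empty lines at the beginning
--         if in_header:
--             stripped = line.strip()
--             if stripped.startswith('--') or stripped.startswith('/*') or stripped.startswith('*') or not stripped:
--                 continue
--             else:
--                 in_header = False
--         result.append(line)
--
--     return '\n'.join(result).strip()
-- ===== SOURCE B (Python) =====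
-- def _clean_sql_for_output(sql: str) -> str:
--     """Remove leading comment headers from SQL for clean output."""
--     # Peel one line at a time off the front with partition; as soon as the
--     # first line is real SQL, return the whole remaining string stripped.
--     while True:
--         first, sep, rest = sql.partition('\n')
--         s = first.strip()
--         if s and not s.startswith(('--', '/*', '*')):
--             return sql.strip()
--         if not sep:
--             return ''
--         sql = rest
-- ===== Notes on version B (the rewrite author's own statement) =====
-- stated objective: simpler
-- what changed: Instead of splitting the whole string into lines, filtering them through an accumulator/flag loop and re-joining, B peels header lines off the front one at a time with str.partition and, on the first real line, returns the remaining suffix stripped, never materialising a line list or rebuilding the string.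
import Mathlib
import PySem

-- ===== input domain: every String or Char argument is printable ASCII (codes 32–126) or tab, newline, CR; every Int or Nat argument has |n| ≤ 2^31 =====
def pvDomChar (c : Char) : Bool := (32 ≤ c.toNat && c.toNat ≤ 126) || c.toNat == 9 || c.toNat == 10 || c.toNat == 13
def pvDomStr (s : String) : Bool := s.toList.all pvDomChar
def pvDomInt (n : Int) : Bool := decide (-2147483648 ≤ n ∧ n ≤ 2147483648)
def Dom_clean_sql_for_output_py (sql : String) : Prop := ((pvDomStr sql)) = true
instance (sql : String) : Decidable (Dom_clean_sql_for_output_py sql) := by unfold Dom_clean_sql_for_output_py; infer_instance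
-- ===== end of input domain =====

-- B peels header lines off the front one at a time (str.partition) and returns the remaining suffix stripped,
-- instead of A's split-all-lines / accumulator-flag loop / re-join (simpler decomposition; same O(n) cost).


-- ===== PORT A =====
-- A's for-loop, carried as structural recursion over the lines with the (result, in_header) state
def cleanLoopA : List String → List String → Bool → List String
  | [], result, _ => result
  | line :: rest, result, in_header =>
    if in_header then
      let stripped := PySem.Str.strip line
      if PySem.Str.startswith stripped "--" || PySem.Str.startswith stripped "/*" ||
         PySem.Str.startswith stripped "*" || stripped == "" then
        cleanLoopA rest result in_header
      else
        cleanLoopA rest (result ++ [line]) false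
    else
      cleanLoopA rest (result ++ [line]) false

def clean_sql_for_output_py (sql : String) : String :=
  let lines := (PySem.Str.split? sql "\n").getD []
  PySem.Str.strip (PySem.Str.join "\n" (cleanLoopA lines [] true))

-- ===== PORT B =====
-- hand port of sql.partition('\n'): (text before the first '\n', some (text after it)), or (sql, none)
-- when there is no '\n' (Python's empty-sep flag); exact for the single-character separator used here
def breakLineB : List Char → List Char × Option (List Char)
  | [] => ([], none)
  | c :: t =>
    if c = '\n' then ([], some t)
    else
      let p := breakLineB t
      (c :: p.1, p.2)

theorem breakLineB_some_length : ∀ (cs l r : List Char), breakLineB cs = (l, some r) → r.length < cs.length := by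
  intro cs
  induction cs with
  | nil => intro l r h; simp [breakLineB] at h
  | cons c t ih =>
    intro l r h
    by_cases hc : c = '\n'
    · simp [breakLineB, hc] at h
      simp [← h.2]
    · simp only [breakLineB, if_neg hc] at h
      rcases ht : breakLineB t with ⟨l', r'⟩
      rw [ht] at h
      obtain ⟨h1, h2⟩ := Prod.mk.injEq .. ▸ h
      subst h2
      exact Nat.lt_trans (ih l' r ht) (by simp)

-- B's while-loop: peel the first line; a real SQL line means "return the whole remaining string stripped"
def altGoB (cs : List Char) : List Char :=
  match h : breakLineB cs with
  | (first, none) =>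
    let s := PySem.Chars.strip first
    if !s.isEmpty && !(PySem.Chars.startswith s "--".toList || PySem.Chars.startswith s "/*".toList ||
        PySem.Chars.startswith s "*".toList) then
      PySem.Chars.strip cs
    else []
  | (first, some rest) =>
    let s := PySem.Chars.strip first
    if !s.isEmpty && !(PySem.Chars.startswith s "--".toList || PySem.Chars.startswith s "/*".toList ||
        PySem.Chars.startswith s "*".toList) then
      PySem.Chars.strip cs
    else altGoB rest
  termination_by cs.length
  decreasing_by exact breakLineB_some_length cs first rest h

def clean_sql_for_output_py_alt (sql : String) : String :=
  String.ofList (altGoB sql.toList)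

-- ===== PRECONDITION & SPEC =====
def Spec_clean_sql_for_output_py (sql : String) (out : String) : Prop := out = clean_sql_for_output_py_alt sql
instance (sql : String) (out : String) : Decidable (Spec_clean_sql_for_output_py sql out) := by unfold Spec_clean_sql_for_output_py; infer_instance

-- ===== CLAIM (what is proved, stated in full; the proofs are below) =====
def Claim_equal_clean_sql_for_output_py : Prop := ∀ (sql : String), Dom_clean_sql_for_output_py sql → Spec_clean_sql_for_output_py sql (clean_sql_for_output_py sql)

-- ===== LEMMAS AND PROOFS =====

-- the lines of cs, described through breakLineB (proof-side mirror of Chars.splitOn cs ['\n'])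
def linesOfB (cs : List Char) : List (List Char) :=
  match h : breakLineB cs with
  | (l, none) => [l]
  | (l, some r) => l :: linesOfB r
  termination_by cs.length
  decreasing_by exact breakLineB_some_length cs l r h

def withPreB (pre : List Char) : List (List Char) → List (List Char)
  | [] => []
  | x :: xs => (pre ++ x) :: xs

-- the header-line test as altGoB's branch condition reads it
def isHdrB (l : List Char) : Bool :=
  !(!(PySem.Chars.strip l).isEmpty && !(PySem.Chars.startswith (PySem.Chars.strip l) "--".toList ||
      PySem.Chars.startswith (PySem.Chars.strip l) "/*".toList ||
      PySem.Chars.startswith (PySem.Chars.strip l) "*".toList))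

theorem breakLineB_none (cs l : List Char) (h : breakLineB cs = (l, none)) : l = cs := by
  induction cs generalizing l with
  | nil => simp [breakLineB] at h; simp [h]
  | cons c t ih =>
    by_cases hc : c = '\n'
    · simp [breakLineB, hc] at h
    · simp only [breakLineB, if_neg hc] at h
      rcases ht : breakLineB t with ⟨l', r'⟩
      rw [ht] at h
      obtain ⟨h1, h2⟩ := Prod.mk.injEq .. ▸ h
      subst h2
      rw [← h1, ih l' ht]

theorem breakLineB_some (cs l r : List Char) (h : breakLineB cs = (l, some r)) :
    cs = l ++ '\n' :: r := by
  induction cs generalizing l r with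
  | nil => simp [breakLineB] at h
  | cons c t ih =>
    by_cases hc : c = '\n'
    · simp [breakLineB, hc] at h
      simp [hc, h.1.symm, h.2]
    · simp only [breakLineB, if_neg hc] at h
      rcases ht : breakLineB t with ⟨l', r'⟩
      rw [ht] at h
      obtain ⟨h1, h2⟩ := Prod.mk.injEq .. ▸ h
      subst h2
      rw [← h1]
      simpa using ih l' r ht

theorem linesOfB_of_none (cs l : List Char) (h : breakLineB cs = (l, none)) :
    linesOfB cs = [l] := by
  rw [linesOfB.eq_def]
  split <;> rename_i heq <;> rw [heq] at h <;> simp_all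

theorem linesOfB_of_some (cs l r : List Char) (h : breakLineB cs = (l, some r)) :
    linesOfB cs = l :: linesOfB r := by
  rw [linesOfB.eq_def]
  split <;> rename_i heq <;> rw [heq] at h <;> simp_all

theorem linesOfB_ne_nil (cs : List Char) : linesOfB cs ≠ [] := by
  rw [linesOfB.eq_def]; split <;> simp

theorem goB_spec (fuel : Nat) : ∀ (l cur : List Char) (acc : List (List Char)), l.length ≤ fuel →
    PySem.Chars.splitOn.go ['\n'] fuel l cur acc = acc.reverse ++ withPreB cur.reverse (linesOfB l) := by
  induction fuel with
  | zero =>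
    intro l cur acc hl
    have : l = [] := by cases l <;> simp_all
    subst this
    simp [PySem.Chars.splitOn.go, linesOfB_of_none [] [] rfl, withPreB]
  | succ fuel ih =>
    intro l cur acc hl
    cases l with
    | nil => simp [PySem.Chars.splitOn.go, linesOfB_of_none [] [] rfl, withPreB]
    | cons c rest =>
      by_cases hc : c = '\n'
      · subst hc
        have hpre : List.isPrefixOf ['\n'] ('\n' :: rest) = true := by simp [List.isPrefixOf]
        rw [PySem.Chars.splitOn.go, if_pos hpre]
        have := ih rest [] (cur.reverse :: acc) (by simpa using Nat.le_of_succ_le_succ hl)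
        have hdrop : List.drop ['\n'].length ('\n' :: rest) = rest := rfl
        rw [hdrop, this, linesOfB_of_some ('\n' :: rest) [] rest rfl]
        cases hlr : linesOfB rest with
        | nil => exact absurd hlr (linesOfB_ne_nil rest)
        | cons q qs => simp [withPreB]
      · have hpre : List.isPrefixOf ['\n'] (c :: rest) = false := by
          simp [List.isPrefixOf]; exact fun h => absurd h.symm hc
        rw [PySem.Chars.splitOn.go, if_neg (by simp [hpre])]
        rw [ih rest (c :: cur) acc (Nat.le_of_succ_le_succ hl)]
        rcases ht : breakLineB rest with ⟨l', r?⟩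
        have hbc : breakLineB (c :: rest) = (c :: l', r?) := by
          simp only [breakLineB, if_neg hc, ht]
        cases r? with
        | none =>
          rw [linesOfB_of_none _ _ ht, linesOfB_of_none _ _ hbc]
          simp [withPreB, List.append_assoc]
        | some r =>
          rw [linesOfB_of_some _ _ _ ht, linesOfB_of_some _ _ _ hbc]
          simp [withPreB, List.append_assoc]

theorem splitOn_eq_linesOfB (cs : List Char) :
    PySem.Chars.splitOn cs ['\n'] = linesOfB cs := by
  rw [PySem.Chars.splitOn, goB_spec (cs.length + 1) cs [] [] (Nat.le_succ _)]
  cases h : linesOfB cs <;> simp [withPreB]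

theorem join_linesOfB (cs : List Char) :
    PySem.Chars.join ['\n'] (linesOfB cs) = cs := by
  induction cs using linesOfB.induct with
  | case1 cs l h =>
    rw [linesOfB_of_none _ _ h, breakLineB_none _ _ h, PySem.Chars.join_singleton]
  | case2 cs l r h ih =>
    rw [linesOfB_of_some _ _ _ h]
    rcases hr : linesOfB r with _ | ⟨q, rest⟩
    · cases (by rw [linesOfB.eq_def] at hr; split at hr <;> simp_all : False)
    · rw [hr] at ih
      rw [PySem.Chars.join_cons_cons, ih, breakLineB_some _ _ _ h]
      simp

def bodyB (first : List Char) : Bool :=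
  !(PySem.Chars.strip first).isEmpty && !(PySem.Chars.startswith (PySem.Chars.strip first) "--".toList ||
      PySem.Chars.startswith (PySem.Chars.strip first) "/*".toList ||
      PySem.Chars.startswith (PySem.Chars.strip first) "*".toList)

theorem altGoB_of_none (cs first : List Char) (h : breakLineB cs = (first, none)) :
    altGoB cs = if bodyB first then PySem.Chars.strip cs else [] := by
  rw [altGoB.eq_def]
  split
  next f heq =>
    have hf : f = first := by rw [heq] at h; exact (Prod.mk.injEq .. ▸ h).1
    subst hf
    rfl
  next f r heq =>
    rw [heq] at h; simp at h

theorem altGoB_of_some (cs first rest : List Char) (h : breakLineB cs = (first, some rest)) :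
    altGoB cs = if bodyB first then PySem.Chars.strip cs else altGoB rest := by
  rw [altGoB.eq_def]
  split
  next f heq =>
    rw [heq] at h; simp at h
  next f r heq =>
    rw [heq] at h
    obtain ⟨h1, h2⟩ := Prod.mk.injEq .. ▸ h
    obtain rfl : r = rest := Option.some.inj h2
    subst h1
    rfl

theorem isHdrB_eq_not_bodyB (l : List Char) : isHdrB l = !bodyB l := rfl

theorem altGoB_eq (cs : List Char) :
    altGoB cs = PySem.Chars.strip (PySem.Chars.join ['\n'] ((linesOfB cs).dropWhile isHdrB)) := by
  induction cs using altGoB.induct with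
  | case1 x first h s hc =>
    have hb' : bodyB first = true := hc
    rw [altGoB_of_none _ _ h, if_pos hb', linesOfB_of_none _ _ h, List.dropWhile_cons,
      show isHdrB first = false by rw [isHdrB_eq_not_bodyB, hb']; rfl,
      breakLineB_none _ _ h]
    simp [PySem.Chars.join_singleton]
  | case2 x first h s hc =>
    have hb' : bodyB first = false := Bool.eq_false_iff.mpr hc
    rw [altGoB_of_none _ _ h, if_neg (by simp [hb']), linesOfB_of_none _ _ h, List.dropWhile_cons,
      show isHdrB first = true by rw [isHdrB_eq_not_bodyB, hb']; rfl]
    rfl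
  | case3 x first rest h s hc =>
    have hb' : bodyB first = true := hc
    rw [altGoB_of_some _ _ _ h, if_pos hb', linesOfB_of_some _ _ _ h, List.dropWhile_cons,
      show isHdrB first = false by rw [isHdrB_eq_not_bodyB, hb']; rfl]
    simp only [Bool.false_eq_true, reduceIte]
    rw [← linesOfB_of_some _ _ _ h, join_linesOfB]
  | case4 x first rest h s hc ih =>
    have hb' : bodyB first = false := Bool.eq_false_iff.mpr hc
    rw [altGoB_of_some _ _ _ h, if_neg (by simp [hb']), linesOfB_of_some _ _ _ h,
      List.dropWhile_cons, show isHdrB first = true by rw [isHdrB_eq_not_bodyB, hb']; rfl]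
    exact ih

-- A-side: the loop drops the leading header lines and keeps the rest
def hdrStrA (line : String) : Bool :=
  PySem.Str.startswith (PySem.Str.strip line) "--" || PySem.Str.startswith (PySem.Str.strip line) "/*" ||
  PySem.Str.startswith (PySem.Str.strip line) "*" || (PySem.Str.strip line == "")

theorem cleanLoopA_false (ls : List String) : ∀ res, cleanLoopA ls res false = res ++ ls := by
  induction ls with
  | nil => intro res; simp [cleanLoopA]
  | cons l t ih => intro res; simp [cleanLoopA, ih]

theorem cleanLoopA_eq_dropWhile (ls : List String) :
    cleanLoopA ls [] true = ls.dropWhile hdrStrA := by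
  induction ls with
  | nil => rfl
  | cons l t ih =>
    rw [List.dropWhile_cons]
    by_cases h : hdrStrA l = true
    · rw [if_pos h]
      rw [← ih]
      simp only [cleanLoopA]
      rw [if_pos trivial, if_pos (by simpa [hdrStrA] using h)]
    · rw [if_neg (by simp_all)]
      simp only [cleanLoopA]
      rw [if_pos trivial, if_neg (by simpa [hdrStrA] using h), cleanLoopA_false]
      simp

theorem beq_empty_eq (t : String) : (t == "") = t.toList.isEmpty := by
  by_cases h : t = ""
  · subst h; rfl
  · have ht : t.toList ≠ [] := by
      intro hh
      exact h (by rw [← String.ofList_toList (s := t), hh])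
    rw [beq_eq_false_iff_ne.mpr h, (List.isEmpty_eq_false_iff).mpr ht]

theorem hdrStrA_ofList (l : List Char) : hdrStrA (String.ofList l) = isHdrB l := by
  simp only [hdrStrA, isHdrB, PySem.Str.startswith_eq, beq_empty_eq, PySem.Str.toList_strip,
    String.toList_ofList, Bool.not_and, Bool.not_not, Bool.not_or]
  cases (PySem.Chars.strip l).isEmpty <;>
    cases PySem.Chars.startswith (PySem.Chars.strip l) "--".toList <;>
    cases PySem.Chars.startswith (PySem.Chars.strip l) "/*".toList <;>
    cases PySem.Chars.startswith (PySem.Chars.strip l) "*".toList <;> rfl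

-- ===== VERDICT (by name: the statement is the Claim_ definition above) =====
set_option maxHeartbeats 1000000 in
theorem clean_sql_for_output_py_spec : Claim_equal_clean_sql_for_output_py := by
  intro sql _
  unfold Spec_clean_sql_for_output_py clean_sql_for_output_py clean_sql_for_output_py_alt
  have hsplit : PySem.Str.split? sql "\n" = some ((linesOfB sql.toList).map String.ofList) := by
    have h := PySem.Str.split?_map sql "\n"
    rw [show ("\n" : String).toList = ['\n'] from rfl] at h
    rw [PySem.Chars.split?] at h
    simp only [List.isEmpty_cons, if_false, Bool.false_eq_true] at h
    rw [splitOn_eq_linesOfB] at h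
    cases hs : PySem.Str.split? sql "\n" with
    | none => rw [hs] at h; simp at h
    | some M =>
      rw [hs] at h
      simp only [Option.map_some, Option.some.injEq] at h
      congr 1
      rw [← h]
      simp [List.map_map, Function.comp_def]
  rw [hsplit]
  simp only [Option.getD_some]
  rw [cleanLoopA_eq_dropWhile, List.dropWhile_map]
  rw [← String.toList_inj, PySem.Str.toList_strip, PySem.Str.toList_join, String.toList_ofList]
  rw [altGoB_eq]
  rw [List.map_map]
  have hpred : (hdrStrA ∘ String.ofList) = isHdrB := funext hdrStrA_ofList
  rw [hpred]
  simp [Function.comp_def]
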